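-- pv_equiv track=rewrite | github.com/maxzyar/Family-Ages-Lord-Morani-Viceroy-of-Diplomaticus- | ages.py | FiveAddUpToHundred
-- ===== SOURCE A (Python) =====
-- def FiveAddUpToHundred(comb):
--     result = 0
--     for s1 in (-1,1):
--         for s2 in (-1,1):
--             for s3 in (-1,1):
--                 for s4 in (-1,1):
--                     for s5 in (-1,1):
--                         if s1*(10*comb[0]+comb[1])+s2*(10*comb[2]+comb[3])+s3*comb[4]+s4*(10*comb[5]+comb[6])+s5*(10*comb[7]+comb[8])==100:
--                             result = 1
--     return result
-- ===== SOURCE B (Python) =====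
-- def FiveAddUpToHundred(comb):
--     vals = [10*comb[0]+comb[1], 10*comb[2]+comb[3], comb[4],
--             10*comb[5]+comb[6], 10*comb[7]+comb[8]]
--     sums = {0}
--     for v in vals:
--         sums = {s + v for s in sums} | {s - v for s in sums}
--     return 1 if 100 in sums else 0
-- ===== Notes on version B (the rewrite author's own statement) =====
-- stated objective: alternative
-- what changed: Replaces A's fixed 5-deep nested sign-enumeration loops (32 explicit combinations, flag variable) by a single pass over the five composite values that folds a reachable-partial-sum set (sums -> {s+v} | {s-v}) and tests membership of 100 at the end.
import Mathlib
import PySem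

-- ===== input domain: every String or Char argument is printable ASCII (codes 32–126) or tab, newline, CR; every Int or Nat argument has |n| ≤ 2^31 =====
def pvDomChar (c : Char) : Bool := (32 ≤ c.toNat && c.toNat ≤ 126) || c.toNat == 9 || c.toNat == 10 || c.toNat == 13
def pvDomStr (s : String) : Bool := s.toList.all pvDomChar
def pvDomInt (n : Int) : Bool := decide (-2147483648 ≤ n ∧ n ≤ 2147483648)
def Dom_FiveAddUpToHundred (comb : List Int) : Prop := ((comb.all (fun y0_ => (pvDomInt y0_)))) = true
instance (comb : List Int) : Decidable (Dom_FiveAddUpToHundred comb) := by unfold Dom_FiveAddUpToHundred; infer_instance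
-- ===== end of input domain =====

-- B replaces A's fixed 5-deep nested sign enumeration (32 combinations) by a single pass
-- building the set of reachable signed partial sums; objective: alternative (same cost at n=5, different algorithm).

-- ===== PORT A =====
-- A's nested 'for s in (-1,1)' loops become nested foldl's over [-1,1]; comb[i] is
-- PySem.List.pyGetD (total under Pre_, which guarantees indices 0..8 are in range).
def FiveAddUpToHundred (comb : List Int) : Int :=
  let g := fun (i : Int) => PySem.List.pyGetD comb i 0
  ([-1,1] : List Int).foldl (fun result s1 =>
    ([-1,1] : List Int).foldl (fun result s2 =>
      ([-1,1] : List Int).foldl (fun result s3 =>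
        ([-1,1] : List Int).foldl (fun result s4 =>
          ([-1,1] : List Int).foldl (fun result s5 =>
            if s1*(10*g 0 + g 1) + s2*(10*g 2 + g 3) + s3*(g 4) + s4*(10*g 5 + g 6) + s5*(10*g 7 + g 8) = 100
            then 1 else result)
            result) result) result) result) 0

-- ===== PORT B =====
-- one loop step of Source B: sums = {s+v for s in sums} | {s-v for s in sums}
def pvStep (sums : List Int) (v : Int) : List Int :=
  PySem.Set.union (PySem.Set.ofList (sums.map (· + v))) (sums.map (· - v))

def FiveAddUpToHundred_alt (comb : List Int) : Int :=
  let g := fun (i : Int) => PySem.List.pyGetD comb i 0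
  let vals : List Int := [10*g 0 + g 1, 10*g 2 + g 3, g 4, 10*g 5 + g 6, 10*g 7 + g 8]
  let sums := vals.foldl pvStep (PySem.Set.ofList [0])
  if (100:Int) ∈ sums then 1 else 0

-- ===== PRECONDITION & SPEC =====
-- Pre_ excludes exactly the lists with fewer than 9 elements, on which the Python A
-- (and B alike) raises IndexError when indexing the ninth element.
def Pre_FiveAddUpToHundred (comb : List Int) : Prop := 9 ≤ comb.length
instance (comb : List Int) : Decidable (Pre_FiveAddUpToHundred comb) := by unfold Pre_FiveAddUpToHundred; infer_instance
def pvWitness_FiveAddUpToHundred : List Int := [1,2,3,4,5,6,7,8,9]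

def Spec_FiveAddUpToHundred (comb : List Int) (out : Int) : Prop := out = FiveAddUpToHundred_alt comb
instance (comb : List Int) (out : Int) : Decidable (Spec_FiveAddUpToHundred comb out) := by unfold Spec_FiveAddUpToHundred; infer_instance

-- ===== CLAIM (what is proved, stated in full; the proofs are below) =====
def Claim_equal_FiveAddUpToHundred : Prop := ∀ (comb : List Int), Dom_FiveAddUpToHundred comb → Pre_FiveAddUpToHundred comb → Spec_FiveAddUpToHundred comb (FiveAddUpToHundred comb)

-- ===== LEMMAS AND PROOFS =====

-- A's nested sign loops, abstracted over the five composite values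
def nestedA (v1 v2 v3 v4 v5 : Int) : Int :=
  ([-1,1] : List Int).foldl (fun result s1 =>
    ([-1,1] : List Int).foldl (fun result s2 =>
      ([-1,1] : List Int).foldl (fun result s3 =>
        ([-1,1] : List Int).foldl (fun result s4 =>
          ([-1,1] : List Int).foldl (fun result s5 =>
            if s1*v1+s2*v2+s3*v3+s4*v4+s5*v5 = 100 then 1 else result)
            result) result) result) result) 0

-- B's reachable-sum computation, abstracted over the five composite values
def setB (v1 v2 v3 v4 v5 : Int) : Int :=
  if (100:Int) ∈ ([v1,v2,v3,v4,v5] : List Int).foldl pvStep (PySem.Set.ofList [0]) then 1 else 0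

-- "x is reachable from start s by adding/subtracting each value of the list once"
def Reach : List Int → Int → Int → Prop
  | [], s, x => s = x
  | v :: vs, s, x => Reach vs (s + v) x ∨ Reach vs (s - v) x

lemma mem_pvStep (x v : Int) (S : List Int) :
    x ∈ pvStep S v ↔ ∃ s ∈ S, s + v = x ∨ s - v = x := by
  simp only [pvStep, PySem.Set.mem_union, PySem.Set.mem_ofList, List.mem_map]
  constructor
  · rintro (⟨a, ha, hh⟩ | ⟨a, ha, hh⟩)
    exacts [⟨a, ha, Or.inl hh⟩, ⟨a, ha, Or.inr hh⟩]
  · rintro ⟨a, ha, hh | hh⟩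
    exacts [Or.inl ⟨a, ha, hh⟩, Or.inr ⟨a, ha, hh⟩]

lemma mem_fold_pvStep (vs : List Int) : ∀ (S : List Int) (x : Int),
    x ∈ vs.foldl pvStep S ↔ ∃ s ∈ S, Reach vs s x := by
  induction vs with
  | nil => intro S x; simp [Reach]
  | cons v vs ih =>
    intro S x
    rw [List.foldl_cons, ih]
    simp only [Reach]
    constructor
    · rintro ⟨t, ht, hr⟩
      rw [mem_pvStep] at ht
      obtain ⟨s, hs, h⟩ := ht
      exact ⟨s, hs, by rcases h with h | h <;> [left; right] <;> simpa [h] using hr⟩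
    · rintro ⟨s, hs, h | h⟩
      · exact ⟨s + v, (mem_pvStep _ _ _).2 ⟨s, hs, Or.inl rfl⟩, h⟩
      · exact ⟨s - v, (mem_pvStep _ _ _).2 ⟨s, hs, Or.inr rfl⟩, h⟩

lemma if_or_flatten (c d : Prop) [Decidable c] [Decidable d] :
    (if c then (1:Int) else if d then 1 else 0) = if c ∨ d then 1 else 0 := by
  split_ifs with h1 h2 <;> tauto

set_option maxHeartbeats 3200000 in
lemma key (v1 v2 v3 v4 v5 : Int) : nestedA v1 v2 v3 v4 v5 = setB v1 v2 v3 v4 v5 := by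
  unfold nestedA setB
  conv_lhs => simp only [List.foldl]
  simp only [if_or_flatten]
  have h : ∀ (P Q : Prop) [Decidable P] [Decidable Q], (P ↔ Q) → (if P then (1:Int) else 0) = if Q then 1 else 0 := by
    intro P Q _ _ h; simp [h]
  apply h
  rw [mem_fold_pvStep]
  simp only [PySem.Set.mem_ofList, List.mem_singleton, exists_eq_left, Reach]
  simp only [or_assoc]
  repeat' apply or_congr
  all_goals omega

-- ===== VERDICT (by name: the statement is the Claim_ definition above) =====
theorem FiveAddUpToHundred_spec : Claim_equal_FiveAddUpToHundred := by
  intro comb _ _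
  unfold Spec_FiveAddUpToHundred
  exact key _ _ _ _ _
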